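-- pv_equiv track=rewrite | github.com/chris-proby/proby-chris | ongoing/나이스디앤알/출구조사/purchase_reason_frequency.py | count_factors
-- ===== SOURCE A (Python) =====
-- from collections import defaultdict
--
-- def count_factors(text: str, factors_dict: dict) -> dict:
--     """텍스트에서 요인별 키워드 매칭 여부(1건 1회만) 집계."""
--     counts = defaultdict(int)
--     text_lower = text.lower()
--     for factor_name, keywords in factors_dict.items():
--         for kw in keywords:
--             if kw in text or kw in text_lower:
--                 counts[factor_name] += 1
--                 break
--     return counts
-- ===== SOURCE B (Python) =====
-- from collections import defaultdict
--
-- def count_factors(text: str, factors_dict: dict) -> dict: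
--     """Same counting, but via a precomputed substring index: collect the distinct
--     keyword lengths, build one hash set of every substring of text/text.lower()
--     of those lengths, then answer each keyword by a single set lookup."""
--     text_lower = text.lower()
--     lengths = {len(kw) for kws in factors_dict.values() for kw in kws}
--     subs = set()
--     n = len(text)
--     for L in lengths:
--         for i in range(n - L + 1):
--             subs.add(text[i:i + L])
--             subs.add(text_lower[i:i + L])
--     counts = defaultdict(int)
--     for name, kws in factors_dict.items():
--         if any(kw in subs for kw in kws):
--             counts[name] += 1
--     return counts
-- ===== Notes on version B (the rewrite author's own statement) =====
-- stated objective: faster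
-- what changed: A scans text/text.lower() once per keyword with 'in'; B precomputes one hash set of all substrings of text and text.lower() whose lengths occur among the keywords, then answers every keyword by a single O(1) set lookup.
import Mathlib
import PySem

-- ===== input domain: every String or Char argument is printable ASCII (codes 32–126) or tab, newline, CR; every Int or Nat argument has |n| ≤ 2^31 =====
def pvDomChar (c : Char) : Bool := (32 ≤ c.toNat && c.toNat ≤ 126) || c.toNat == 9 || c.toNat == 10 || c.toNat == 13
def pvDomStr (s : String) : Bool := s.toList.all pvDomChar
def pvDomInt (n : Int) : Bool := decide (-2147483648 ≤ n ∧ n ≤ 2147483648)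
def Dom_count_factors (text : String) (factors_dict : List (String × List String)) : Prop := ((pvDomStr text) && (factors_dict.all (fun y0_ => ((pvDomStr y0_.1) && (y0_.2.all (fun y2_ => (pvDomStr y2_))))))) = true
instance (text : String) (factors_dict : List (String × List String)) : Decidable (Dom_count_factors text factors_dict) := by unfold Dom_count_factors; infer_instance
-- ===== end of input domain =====

-- B replaces A's per-keyword substring scans by one precomputed hash set of all substrings of
-- text/text.lower() whose lengths are keyword lengths; each keyword is then a single set lookup.

-- ===== PORT A =====
-- inner 'for kw in keywords: … break' loop of A
def cfInner (text tl : String) (counts : PySem.Dict String Int) (name : String) : List String → PySem.Dict String Int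
  | [] => counts
  | kw :: rest =>
    if PySem.Str.isIn kw text || PySem.Str.isIn kw tl then
      PySem.Dict.modify counts name 0 (· + 1)
    else cfInner text tl counts name rest

def count_factors (text : String) (factors_dict : List (String × List String)) : List (String × Int) :=
  let text_lower := PySem.Str.lower text
  (factors_dict.foldl (fun counts p => cfInner text text_lower counts p.1 p.2) PySem.Dict.empty).items

-- ===== PORT B =====
-- the double loop of Source B that builds the substring set 'subs'
def cfSubs (text tl : String) (n : Int) (lengths : PySem.Set Int) : PySem.Set String :=
  lengths.foldl
    (fun s L =>
      (PySem.List.pyRange 0 (n - L + 1) 1).foldl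
        (fun s i =>
          PySem.Set.add (PySem.Set.add s (PySem.Str.slice text (some i) (some (i + L))))
            (PySem.Str.slice tl (some i) (some (i + L))))
        s)
    PySem.Set.empty

def count_factors_alt (text : String) (factors_dict : List (String × List String)) : List (String × Int) :=
  let text_lower := PySem.Str.lower text
  let lengths : PySem.Set Int :=
    PySem.Set.ofList ((factors_dict.flatMap (fun p => p.2)).map PySem.Str.len)
  let subs := cfSubs text text_lower (PySem.Str.len text) lengths
  (factors_dict.foldl
    (fun counts p =>
      if p.2.any (fun kw => PySem.Set.contains subs kw) then
        PySem.Dict.modify counts p.1 0 (· + 1)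
      else counts)
    PySem.Dict.empty).items

-- ===== PRECONDITION & SPEC =====
def Spec_count_factors (text : String) (factors_dict : List (String × List String)) (out : List (String × Int)) : Prop := out = count_factors_alt text factors_dict
instance (text : String) (factors_dict : List (String × List String)) (out : List (String × Int)) : Decidable (Spec_count_factors text factors_dict out) := by unfold Spec_count_factors; infer_instance

-- ===== CLAIM (what is proved, stated in full; the proofs are below) =====
def Claim_equal_count_factors : Prop := ∀ (text : String) (factors_dict : List (String × List String)), Dom_count_factors text factors_dict → Spec_count_factors text factors_dict (count_factors text factors_dict)

-- ===== LEMMAS AND PROOFS =====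

-- membership in a fold that adds two elements per index
theorem mem_foldl_add2 (l : List Int) (f g : Int → String) (s : PySem.Set String) (x : String) :
    x ∈ l.foldl (fun s i => PySem.Set.add (PySem.Set.add s (f i)) (g i)) s ↔
      x ∈ s ∨ ∃ i ∈ l, x = f i ∨ x = g i := by
  induction l generalizing s with
  | nil => simp
  | cons a t ih =>
    simp only [List.foldl_cons, ih, PySem.Set.mem_add, List.mem_cons]
    constructor
    · rintro (((h | h) | h) | ⟨i, hi, h⟩)
      · exact Or.inl h
      · exact Or.inr ⟨a, Or.inl rfl, Or.inl h⟩
      · exact Or.inr ⟨a, Or.inl rfl, Or.inr h⟩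
      · exact Or.inr ⟨i, Or.inr hi, h⟩
    · rintro (h | ⟨i, (rfl | hi), h⟩)
      · exact Or.inl (Or.inl (Or.inl h))
      · rcases h with h | h
        · exact Or.inl (Or.inl (Or.inr h))
        · exact Or.inl (Or.inr h)
      · exact Or.inr ⟨i, hi, h⟩

-- membership characterisation of the substring set of Source B
theorem mem_cfSubs (text tl : String) (n : Int) (lengths : PySem.Set Int) (x : String) :
    x ∈ cfSubs text tl n lengths ↔
      ∃ L ∈ (lengths : List Int), ∃ i ∈ PySem.List.pyRange 0 (n - L + 1) 1,
        x = PySem.Str.slice text (some i) (some (i + L)) ∨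
        x = PySem.Str.slice tl (some i) (some (i + L)) := by
  unfold cfSubs
  generalize hs : (PySem.Set.empty : PySem.Set String) = s0
  have : ∀ (ls : List Int) (s : PySem.Set String),
      x ∈ ls.foldl (fun s L =>
        (PySem.List.pyRange 0 (n - L + 1) 1).foldl
          (fun s i => PySem.Set.add (PySem.Set.add s (PySem.Str.slice text (some i) (some (i + L))))
              (PySem.Str.slice tl (some i) (some (i + L)))) s) s ↔
      x ∈ s ∨ ∃ L ∈ ls, ∃ i ∈ PySem.List.pyRange 0 (n - L + 1) 1,
        x = PySem.Str.slice text (some i) (some (i + L)) ∨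
        x = PySem.Str.slice tl (some i) (some (i + L)) := by
    intro ls
    induction ls with
    | nil => simp
    | cons a t ih =>
      intro s
      simp only [List.foldl_cons, ih, mem_foldl_add2, List.mem_cons]
      constructor
      · rintro ((h | h) | ⟨L, hL, h⟩)
        · exact Or.inl h
        · exact Or.inr ⟨a, Or.inl rfl, h⟩
        · exact Or.inr ⟨L, Or.inr hL, h⟩
      · rintro (h | ⟨L, (rfl | hL), h⟩)
        · exact Or.inl (Or.inl h)
        · exact Or.inl (Or.inr h)
        · exact Or.inr ⟨L, hL, h⟩
  rw [this, ← hs]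
  simp [PySem.Set.empty]

-- a clamped-to-range slice is an infix
theorem slice_isIn (text : String) (kw : String) (i L : Int) (h0i : 0 ≤ i) (h0L : 0 ≤ L)
    (hkw : kw = PySem.Str.slice text (some i) (some (i + L))) :
    PySem.Str.isIn kw text = true := by
  rw [PySem.Str.isIn_iff_infix, hkw, PySem.Str.toList_slice, PySem.Chars.slice_eq_listSlice,
    PySem.List.slice_toNat text.toList h0i (by omega)]
  exact ((List.take_prefix _ _).isInfix).trans ((List.drop_suffix _ _).isInfix)

-- an infix of a string IS one of the slices Source B enumerates for its length
theorem isIn_exists_slice (s : String) (kw : String) (h : PySem.Str.isIn kw s = true) :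
    ∃ j : Nat, (j : Int) + PySem.Str.len kw ≤ PySem.Str.len s ∧
      kw = PySem.Str.slice s (some (j : Int)) (some ((j : Int) + PySem.Str.len kw)) := by
  rw [PySem.Str.isIn_iff_infix] at h
  obtain ⟨pre, suf, hdecomp⟩ := h
  refine ⟨pre.length, ?_, ?_⟩
  · rw [PySem.Str.len_eq, PySem.Str.len_eq, ← hdecomp]
    simp [List.length_append]
  · have htl : (PySem.Str.slice s (some (pre.length : Int))
        (some ((pre.length : Int) + PySem.Str.len kw))).toList = kw.toList := by
      rw [PySem.Str.len_eq, PySem.Str.toList_slice, PySem.Chars.slice_eq_listSlice,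
        PySem.List.slice_natCast_add, ← hdecomp, List.append_assoc, List.drop_left, List.take_left]
    have := congrArg String.ofList htl
    simpa using this.symm

-- lower preserves length
theorem len_lower (s : String) : (PySem.Str.lower s).toList.length = s.toList.length := by
  rw [PySem.Str.toList_lower]
  simp [PySem.Chars.lower]

-- the set lookup in B computes exactly A's test, for keywords whose length was indexed
theorem contains_cfSubs (text : String) (lengths : PySem.Set Int) (kw : String)
    (hpos : ∀ L ∈ (lengths : List Int), 0 ≤ L)
    (hlen : PySem.Str.len kw ∈ (lengths : List Int)) :
    PySem.Set.contains (cfSubs text (PySem.Str.lower text) (PySem.Str.len text) lengths) kw =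
      (PySem.Str.isIn kw text || PySem.Str.isIn kw (PySem.Str.lower text)) := by
  have hlow : PySem.Str.len (PySem.Str.lower text) = PySem.Str.len text := by
    rw [PySem.Str.len_eq, PySem.Str.len_eq, len_lower]
  rw [Bool.eq_iff_iff, PySem.Set.contains_iff, mem_cfSubs, Bool.or_eq_true]
  constructor
  · rintro ⟨L, hL, i, hi, h⟩
    have h0L : 0 ≤ L := hpos L hL
    have h0i : 0 ≤ i := (PySem.List.mem_pyRange_one.mp hi).1
    rcases h with h | h
    · exact Or.inl (slice_isIn text kw i L h0i h0L h)
    · exact Or.inr (slice_isIn (PySem.Str.lower text) kw i L h0i h0L h)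
  · intro h
    rcases h with h | h
    · obtain ⟨j, hj, hsl⟩ := isIn_exists_slice text kw h
      refine ⟨PySem.Str.len kw, hlen, (j : Int), ?_, Or.inl hsl⟩
      rw [PySem.List.mem_pyRange_one]
      constructor
      · exact Int.natCast_nonneg j
      · omega
    · obtain ⟨j, hj, hsl⟩ := isIn_exists_slice (PySem.Str.lower text) kw h
      refine ⟨PySem.Str.len kw, hlen, (j : Int), ?_, Or.inr hsl⟩
      rw [PySem.List.mem_pyRange_one]
      rw [hlow] at hj
      constructor
      · exact Int.natCast_nonneg j
      · omega

-- A's break-loop equals B's 'if any(...)' step, keyword tests being equal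
theorem cfInner_eq_any (text tl : String) (counts : PySem.Dict String Int) (name : String)
    (kws : List String) (subs : PySem.Set String)
    (h : ∀ kw ∈ kws, PySem.Set.contains subs kw = (PySem.Str.isIn kw text || PySem.Str.isIn kw tl)) :
    cfInner text tl counts name kws =
      (if kws.any (fun kw => PySem.Set.contains subs kw) then
        PySem.Dict.modify counts name 0 (· + 1)
      else counts) := by
  induction kws with
  | nil => simp [cfInner]
  | cons kw rest ih =>
    have hkw := h kw (List.mem_cons_self ..)
    have ih' := ih (fun kw' h' => h kw' (List.mem_cons_of_mem _ h'))
    cases hc : (PySem.Str.isIn kw text || PySem.Str.isIn kw tl) with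
    | true =>
      simp only [cfInner, hc, List.any_cons, hkw, Bool.true_or, if_true]
    | false =>
      simp only [cfInner, hc, List.any_cons, hkw, Bool.false_or,
        if_neg Bool.false_ne_true, ih']

-- ===== VERDICT (by name: the statement is the Claim_ definition above) =====
theorem count_factors_spec : Claim_equal_count_factors := by
  intro text factors_dict _
  show count_factors text factors_dict = count_factors_alt text factors_dict
  simp only [count_factors, count_factors_alt]
  congr 1
  apply PySem.List.foldl_congr_mem
  intro counts p hp
  apply cfInner_eq_any
  intro kw hkw
  apply contains_cfSubs
  · intro L hL
    rw [PySem.Set.mem_ofList] at hL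
    obtain ⟨kw', _, rfl⟩ := List.mem_map.mp hL
    rw [PySem.Str.len_eq]
    exact Int.natCast_nonneg _
  · rw [PySem.Set.mem_ofList]
    exact List.mem_map_of_mem (List.mem_flatMap.mpr ⟨p, hp, hkw⟩)
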